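-- pv_equiv track=rewrite | github.com/pidan-bilibili/coverage-convert | verilator_interpreter.py | get_line_info
-- ===== SOURCE A (Python) =====
-- def get_line_info(line):
-- 	text_1 = r"\x01"
-- 	text_2 = r"\x02"
--
-- 	string = ""
-- 	output = []
-- 	count = 0
-- 	for i in range(len(line)):
-- 		string += line[i]
-- 		if (count % 2 == 0):
-- 			if string[-4:] == text_1:
-- 				string = ""
-- 			if string[-4:] == text_2:
-- 				output.append(string[:-4])
-- 				string = ""
-- 				count += 1
-- 		else:
-- 			if string[-4:] == text_2:
-- 				string = ""
-- 			if string[-4:] == text_1: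
-- 				output.append(string[:-4])
-- 				string = ""
-- 				count += 1
-- 	return output
-- ===== SOURCE B (Python) =====
-- def get_line_info(line):
-- 	p1 = r"\x01"
-- 	p2 = r"\x02"
-- 	out = []
-- 	parity = 0
-- 	rest = line
-- 	while True:
-- 		i1 = rest.find(p1)
-- 		i2 = rest.find(p2)
-- 		if i1 < 0 and i2 < 0:
-- 			return out
-- 		if i2 < 0 or (0 <= i1 and i1 < i2):
-- 			idx = i1
-- 			emit = (parity == 1)
-- 		else:
-- 			idx = i2
-- 			emit = (parity == 0)
-- 		if emit:
-- 			out.append(rest[:idx])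
-- 			parity = 1 - parity
-- 		rest = rest[idx + 4:]
-- ===== Notes on version B (the rewrite author's own statement) =====
-- stated objective: faster
-- what changed: A grows a buffer character by character and tests its last-4-character suffix against both delimiters at every position; B instead jumps between delimiter occurrences found with str.find, keeping only a parity state and slicing the token out of the remaining text when one is emitted.
import Mathlib
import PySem

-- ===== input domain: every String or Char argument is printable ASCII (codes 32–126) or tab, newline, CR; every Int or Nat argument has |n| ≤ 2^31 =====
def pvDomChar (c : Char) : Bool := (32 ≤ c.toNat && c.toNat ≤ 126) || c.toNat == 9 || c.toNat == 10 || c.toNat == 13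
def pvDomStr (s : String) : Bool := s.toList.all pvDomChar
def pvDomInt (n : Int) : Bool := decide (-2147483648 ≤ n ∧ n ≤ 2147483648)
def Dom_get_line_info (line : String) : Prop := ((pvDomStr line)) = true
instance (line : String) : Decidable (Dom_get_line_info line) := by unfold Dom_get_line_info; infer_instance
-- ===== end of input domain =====

-- B replaces A's per-character suffix state machine by a find-based event loop that jumps
-- from delimiter occurrence to delimiter occurrence (measured faster; same return value).

-- ===== PORT A =====
-- A: per-character loop appending to `string` and testing its last-4-character suffix.
-- the two 4-char raw literals r"\x01" and r"\x02"
def pvPat1 : List Char := ['\\', 'x', '0', '1']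
def pvPat2 : List Char := ['\\', 'x', '0', '2']

-- one iteration of A's for-loop; state = (string, output, count), string as List Char
def pvStepA (st : List Char × List String × Int) (c : Char) : List Char × List String × Int :=
  let s := st.1 ++ [c]
  if PySem.Int.mod st.2.2 2 == 0 then
    let s := if PySem.Chars.slice s (some (-4)) none == pvPat1 then [] else s
    if PySem.Chars.slice s (some (-4)) none == pvPat2 then
      ([], st.2.1 ++ [String.ofList (PySem.Chars.slice s none (some (-4)))], st.2.2 + 1)
    else (s, st.2.1, st.2.2)
  else
    let s := if PySem.Chars.slice s (some (-4)) none == pvPat2 then [] else s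
    if PySem.Chars.slice s (some (-4)) none == pvPat1 then
      ([], st.2.1 ++ [String.ofList (PySem.Chars.slice s none (some (-4)))], st.2.2 + 1)
    else (s, st.2.1, st.2.2)

def get_line_info (line : String) : List String :=
  (line.toList.foldl pvStepA (([] : List Char), ([] : List String), (0 : Int))).2.1

-- ===== PORT B =====
-- termination helper for pvGoB: a found occurrence leaves a strictly shorter remainder
theorem pvDropOcc (rest pat : List Char) (h4 : pat.length = 4)
    (h : ¬ PySem.Chars.find rest pat < 0) :
    (PySem.Chars.slice rest (some (PySem.Chars.find rest pat + 4)) none).length < rest.length := by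
  have h0 : 0 ≤ PySem.Chars.find rest pat := not_lt.mp h
  have hspec := PySem.Chars.find_spec (s := rest) (sub := pat) h0
  have hlen := hspec.1.length_le
  simp [List.length_drop, h4] at hlen
  rw [PySem.Chars.slice_eq_listSlice,
    PySem.List.slice_from rest (by omega : (0:Int) ≤ PySem.Chars.find rest pat + 4)]
  simp [List.length_drop]
  omega

-- B's while-loop: find both delimiters in the remaining text, handle the earlier one
def pvGoB (parity : Int) (out : List String) (rest : List Char) : List String :=
  let i1 := PySem.Chars.find rest pvPat1
  let i2 := PySem.Chars.find rest pvPat2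
  if h : i1 < 0 ∧ i2 < 0 then out
  else
    let idx : Int := if i2 < 0 ∨ (0 ≤ i1 ∧ i1 < i2) then i1 else i2
    let emit : Bool := if i2 < 0 ∨ (0 ≤ i1 ∧ i1 < i2) then parity == 1 else parity == 0
    let out' := if emit then out ++ [String.ofList (PySem.Chars.slice rest none (some idx))] else out
    let parity' := if emit then 1 - parity else parity
    pvGoB parity' out' (PySem.Chars.slice rest (some (idx + 4)) none)
termination_by rest.length
decreasing_by
  split_ifs with hc
  · exact pvDropOcc rest pvPat1 rfl (by rcases hc with hc | hc <;> [exact fun h1 => h ⟨h1, hc⟩; omega])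
  · exact pvDropOcc rest pvPat2 rfl (by omega)

def get_line_info_alt (line : String) : List String :=
  pvGoB 0 [] line.toList

-- ===== PRECONDITION & SPEC =====
def Spec_get_line_info (line : String) (out : List String) : Prop := out = get_line_info_alt line
instance (line : String) (out : List String) : Decidable (Spec_get_line_info line out) := by unfold Spec_get_line_info; infer_instance

-- ===== CLAIM (what is proved, stated in full; the proofs are below) =====
def Claim_equal_get_line_info : Prop := ∀ (line : String), Dom_get_line_info line → Spec_get_line_info line (get_line_info line)

-- ===== LEMMAS AND PROOFS =====
-- the last-4 suffix of a processed prefix of l equals a 4-char pattern iff the pattern occurs there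
theorem pvSliceTake (l : List Char) (n : Nat) (hn : n ≤ l.length) (pat : List Char)
    (hp : pat.length = 4) :
    PySem.Chars.slice (l.take n) (some (-4)) none = pat ↔ 4 ≤ n ∧ pat <+: l.drop (n - 4) := by
  rw [PySem.Chars.slice_eq_listSlice, PySem.List.slice_from_neg_ofNat (l.take n) 4 (by omega)]
  have hlen : (l.take n).length = n := by simp; omega
  rw [hlen, List.drop_take]
  by_cases h4 : 4 ≤ n
  · have : n - (n - 4) = 4 := by omega
    rw [this]
    constructor
    · intro he; exact ⟨h4, he ▸ List.take_prefix 4 _⟩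
    · rintro ⟨_, hpre⟩
      have h := List.prefix_iff_eq_take.mp hpre
      rw [hp] at h; exact h.symm
  · constructor
    · intro he
      have : (List.take (n - (n - 4)) (List.drop (n - 4) l)).length = pat.length := by rw [he]
      simp [hp] at this; omega
    · intro ⟨h, _⟩; omega

-- one iteration of A's loop when the grown string does not end in either delimiter
theorem pvStepNoMatch (s : List Char) (out : List String) (count : Int) (c : Char)
    (h1 : PySem.Chars.slice (s ++ [c]) (some (-4)) none ≠ pvPat1)
    (h2 : PySem.Chars.slice (s ++ [c]) (some (-4)) none ≠ pvPat2) :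
    pvStepA (s, out, count) c = (s ++ [c], out, count) := by
  simp only [PySem.Chars.slice_eq_listSlice] at h1 h2
  simp [pvStepA, h1, h2]

-- A's loop walks match-free text leaving output and count untouched
theorem pvMarch (l : List Char) (out : List String) (count : Int) (j : Nat) (hj : j ≤ l.length)
    (hmin : ∀ i < j, ¬ pvPat1 <+: l.drop i ∧ ¬ pvPat2 <+: l.drop i) :
    List.foldl pvStepA (([] : List Char), out, count) l
      = List.foldl pvStepA (l.take j, out, count) (l.drop j) := by
  induction j with
  | zero => simp
  | succ j ih =>
    have hj' : j < l.length := by omega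
    rw [ih (by omega) (fun i hi => hmin i (by omega)),
      List.drop_eq_getElem_cons hj', List.foldl_cons]
    have hstep : pvStepA (l.take j, out, count) l[j] = (l.take (j+1), out, count) := by
      have htake : l.take j ++ [l[j]] = l.take (j+1) := by
        rw [List.take_add_one, List.getElem?_eq_getElem hj']; rfl
      have hnm : ∀ pat : List Char, pat.length = 4 → (pat = pvPat1 ∨ pat = pvPat2) →
          PySem.Chars.slice (l.take j ++ [l[j]]) (some (-4)) none ≠ pat := by
        intro pat hp hor hcon
        rw [htake] at hcon
        rcases (pvSliceTake l (j+1) (by omega) pat hp).mp hcon with ⟨h4, hpre⟩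
        rcases hor with rfl | rfl
        · exact (hmin (j+1-4) (by omega)).1 hpre
        · exact (hmin (j+1-4) (by omega)).2 hpre
      rw [pvStepNoMatch _ _ _ _ (hnm pvPat1 rfl (Or.inl rfl)) (hnm pvPat2 rfl (Or.inr rfl)), htake]
    rw [hstep]

-- A's loop across the first delimiter occurrence: one reset/emit event
theorem pvMatchStep (l : List Char) (out : List String) (count : Int) (j : Nat) (pat : List Char)
    (hpat : pat = pvPat1 ∨ pat = pvPat2)
    (hocc : pat <+: l.drop j)
    (hmin : ∀ i < j, ¬ pvPat1 <+: l.drop i ∧ ¬ pvPat2 <+: l.drop i) :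
    List.foldl pvStepA (([] : List Char), out, count) l =
      List.foldl pvStepA (([] : List Char),
        (if (PySem.Int.mod count 2 == 0) == (pat == pvPat2) then
            out ++ [String.ofList (l.take j)] else out),
        (if (PySem.Int.mod count 2 == 0) == (pat == pvPat2) then count + 1 else count))
        (l.drop (j+4)) := by
  have hp4 : pat.length = 4 := by rcases hpat with rfl | rfl <;> rfl
  have hj4 : j + 4 ≤ l.length := by
    have := hocc.length_le
    simp [hp4] at this; omega
  obtain ⟨t, ht⟩ := hocc
  have htail : t = l.drop (j+4) := by
    have h := congrArg (List.drop 4) ht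
    rw [List.drop_append_of_le_length (by omega), List.drop_drop, ← hp4,
      List.drop_length] at h
    simpa [hp4] using h
  have htk : ∀ m, m ≤ 4 → l.take j ++ pat.take m = l.take (j+m) := by
    intro m hm
    rw [List.take_add, ← ht, List.take_append_of_le_length (by omega)]
  have hDno : ∀ n : Nat, j < n → n < j + 4 → ∀ pat' : List Char,
      (pat' = pvPat1 ∨ pat' = pvPat2) →
      PySem.Chars.slice (l.take n) (some (-4)) none ≠ pat' := by
    intro n hn1 hn2 pat' hor hcon
    have hp' : pat'.length = 4 := by rcases hor with rfl | rfl <;> rfl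
    rcases (pvSliceTake l n (by omega) pat' hp').mp hcon with ⟨h4, hpre⟩
    have hlt : n - 4 < j := by omega
    rcases hor with rfl | rfl
    · exact (hmin (n-4) hlt).1 hpre
    · exact (hmin (n-4) hlt).2 hpre
  have hs4 : PySem.Chars.slice (l.take (j+4)) (some (-4)) none = pat :=
    (pvSliceTake l (j+4) (by omega) pat hp4).mpr ⟨by omega, by simpa using ⟨t, ht⟩⟩
  have huniq : ∀ pat' : List Char, (pat' = pvPat1 ∨ pat' = pvPat2) → pat' ≠ pat →
      PySem.Chars.slice (l.take (j+4)) (some (-4)) none ≠ pat' := by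
    intro pat' hor hne hcon
    have hp' : pat'.length = 4 := by rcases hor with rfl | rfl <;> rfl
    rcases (pvSliceTake l (j+4) (by omega) pat' hp').mp hcon with ⟨-, hpre⟩
    have h1 := List.prefix_iff_eq_take.mp hpre
    have h2 := List.prefix_iff_eq_take.mp ⟨t, ht⟩
    rw [hp'] at h1
    rw [hp4] at h2
    simp at h1 h2
    exact hne (h1.trans h2.symm)
  have hemit : PySem.Chars.slice (l.take (j+4)) none (some (-4)) = l.take j := by
    rw [PySem.Chars.slice_eq_listSlice, PySem.List.slice_to_neg_ofNat _ 4 (by omega)]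
    have hlen : (l.take (j+4)).length = j + 4 := by simp; omega
    rw [hlen, List.take_take]
    congr 1; omega
  have hsplit : List.drop j l = pat ++ l.drop (j+4) := by rw [← htail]; exact ht.symm
  rw [pvMarch l out count j (by omega) hmin, hsplit, List.foldl_append]
  congr 1
  rcases hpat with rfl | rfl
  · -- pat = pvPat1
    have e1 : l.take j ++ ['\\'] = l.take (j+1) := by simpa using htk 1 (by omega)
    have e2 : l.take (j+1) ++ ['x'] = l.take (j+2) := by
      rw [← htk 1 (by omega), ← htk 2 (by omega)]; simp [pvPat1]
    have e3 : l.take (j+2) ++ ['0'] = l.take (j+3) := by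
      rw [← htk 2 (by omega), ← htk 3 (by omega)]; simp [pvPat1]
    have e4 : l.take (j+3) ++ ['1'] = l.take (j+4) := by
      rw [← htk 3 (by omega), ← htk 4 (by omega)]; simp [pvPat1]
    show List.foldl pvStepA (l.take j, out, count) ['\\','x','0','1'] = _
    simp only [List.foldl_cons, List.foldl_nil]
    rw [pvStepNoMatch (l.take j) out count '\\' (by rw [e1]; exact hDno (j+1) (by omega) (by omega) _ (Or.inl rfl))
        (by rw [e1]; exact hDno (j+1) (by omega) (by omega) _ (Or.inr rfl)), e1]
    rw [pvStepNoMatch (l.take (j+1)) out count 'x' (by rw [e2]; exact hDno (j+2) (by omega) (by omega) _ (Or.inl rfl))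
        (by rw [e2]; exact hDno (j+2) (by omega) (by omega) _ (Or.inr rfl)), e2]
    rw [pvStepNoMatch (l.take (j+2)) out count '0' (by rw [e3]; exact hDno (j+3) (by omega) (by omega) _ (Or.inl rfl))
        (by rw [e3]; exact hDno (j+3) (by omega) (by omega) _ (Or.inr rfl)), e3]
    have hne2 := huniq pvPat2 (Or.inr rfl) (by decide)
    simp only [PySem.Chars.slice_eq_listSlice] at hs4 hne2 hemit
    by_cases hpar : (2:Int) ∣ count <;>
      simp [pvStepA, e4, hs4, hne2, hemit, hpar, PySem.Int.mod_eq_zero_iff_dvd, pvPat1, pvPat2] <;> decide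
  · -- pat = pvPat2
    have e1 : l.take j ++ ['\\'] = l.take (j+1) := by simpa using htk 1 (by omega)
    have e2 : l.take (j+1) ++ ['x'] = l.take (j+2) := by
      rw [← htk 1 (by omega), ← htk 2 (by omega)]; simp [pvPat2]
    have e3 : l.take (j+2) ++ ['0'] = l.take (j+3) := by
      rw [← htk 2 (by omega), ← htk 3 (by omega)]; simp [pvPat2]
    have e4 : l.take (j+3) ++ ['2'] = l.take (j+4) := by
      rw [← htk 3 (by omega), ← htk 4 (by omega)]; simp [pvPat2]
    show List.foldl pvStepA (l.take j, out, count) ['\\','x','0','2'] = _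
    simp only [List.foldl_cons, List.foldl_nil]
    rw [pvStepNoMatch (l.take j) out count '\\' (by rw [e1]; exact hDno (j+1) (by omega) (by omega) _ (Or.inl rfl))
        (by rw [e1]; exact hDno (j+1) (by omega) (by omega) _ (Or.inr rfl)), e1]
    rw [pvStepNoMatch (l.take (j+1)) out count 'x' (by rw [e2]; exact hDno (j+2) (by omega) (by omega) _ (Or.inl rfl))
        (by rw [e2]; exact hDno (j+2) (by omega) (by omega) _ (Or.inr rfl)), e2]
    rw [pvStepNoMatch (l.take (j+2)) out count '0' (by rw [e3]; exact hDno (j+3) (by omega) (by omega) _ (Or.inl rfl))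
        (by rw [e3]; exact hDno (j+3) (by omega) (by omega) _ (Or.inr rfl)), e3]
    have hne1 := huniq pvPat1 (Or.inl rfl) (by decide)
    simp only [PySem.Chars.slice_eq_listSlice] at hs4 hne1 hemit
    by_cases hpar : (2:Int) ∣ count <;>
      simp [pvStepA, e4, hs4, hne1, hemit, hpar, PySem.Int.mod_eq_zero_iff_dvd, pvPat1, pvPat2] <;> decide

-- a negative find means the pattern occurs nowhere
theorem pvNoOcc (l pat : List Char) (hneg : PySem.Chars.find l pat < 0) :
    ∀ i, ¬ pat <+: l.drop i := by
  intro i hpre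
  have hfind : PySem.Chars.find l pat = -1 := by
    have := PySem.Chars.neg_one_le_find l pat; omega
  exact (PySem.Chars.find_eq_neg_one_iff l pat).mp hfind
    ((PySem.Chars.isIn_iff_infix _ _).mp
      ((PySem.Chars.exists_prefix_drop_iff_isIn _ _).mp ⟨i, hpre⟩))

-- main invariant: A's fold from a reset point equals B's event loop
theorem pvMain (n : Nat) : ∀ (l : List Char), l.length ≤ n → ∀ (out : List String) (count : Int),
    (List.foldl pvStepA (([] : List Char), out, count) l).2.1
      = pvGoB (PySem.Int.mod count 2) out l := by
  induction n with
  | zero =>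
    intro l hl out count
    have hnil : l = [] := List.eq_nil_of_length_eq_zero (by omega)
    subst hnil
    rw [pvGoB]
    simp [show PySem.Chars.find [] pvPat1 = -1 from
        (PySem.Chars.find_eq_neg_one_iff _ _).mpr (by decide),
      show PySem.Chars.find [] pvPat2 = -1 from
        (PySem.Chars.find_eq_neg_one_iff _ _).mpr (by decide)]
  | succ n ih =>
    intro l hl out count
    rw [pvGoB]
    by_cases hocc : PySem.Chars.find l pvPat1 < 0 ∧ PySem.Chars.find l pvPat2 < 0
    · rw [dif_pos hocc]
      rw [pvMarch l out count l.length (le_refl _)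
        (fun i _ => ⟨pvNoOcc l pvPat1 hocc.1 i, pvNoOcc l pvPat2 hocc.2 i⟩)]
      simp
    · rw [dif_neg hocc]
      have hmod : PySem.Int.mod count 2 = count % 2 :=
        PySem.Int.mod_eq_emod_of_pos (by norm_num : (0:Int) < 2)
      have hm01 : count % 2 = 0 ∨ count % 2 = 1 := by omega
      have hmsucc : (count + 1) % 2 = 1 - count % 2 := by omega
      by_cases hc : PySem.Chars.find l pvPat2 < 0 ∨
          (0 ≤ PySem.Chars.find l pvPat1 ∧ PySem.Chars.find l pvPat1 < PySem.Chars.find l pvPat2)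
      · -- event is pvPat1 at i1
        rw [if_pos hc, if_pos hc]
        have h1 : 0 ≤ PySem.Chars.find l pvPat1 := by
          rcases hc with hc | hc
          · have := PySem.Chars.neg_one_le_find l pvPat1; omega
          · exact hc.1
        have hspec := PySem.Chars.find_spec (s := l) (sub := pvPat1) h1
        have hmin : ∀ i < (PySem.Chars.find l pvPat1).toNat,
            ¬ pvPat1 <+: l.drop i ∧ ¬ pvPat2 <+: l.drop i := by
          intro i hi
          refine ⟨hspec.2 i hi, ?_⟩
          rcases hc with hc | hc
          · exact pvNoOcc l pvPat2 hc i
          · exact (PySem.Chars.find_spec (s := l) (sub := pvPat2) (by omega)).2 i (by omega)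
        rw [pvMatchStep l out count (PySem.Chars.find l pvPat1).toNat pvPat1 (Or.inl rfl)
          hspec.1 hmin]
        have hlen4 : (PySem.Chars.find l pvPat1).toNat + 4 ≤ l.length := by
          have hx := hspec.1.length_le
          simp [List.length_drop, show pvPat1.length = 4 from rfl] at hx; omega
        have hdrop : PySem.Chars.slice l (some (PySem.Chars.find l pvPat1 + 4)) none
            = l.drop ((PySem.Chars.find l pvPat1).toNat + 4) := by
          rw [PySem.Chars.slice_eq_listSlice, PySem.List.slice_from l (by omega)]
          congr 1; omega
        have htake : PySem.Chars.slice l none (some (PySem.Chars.find l pvPat1))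
            = l.take (PySem.Chars.find l pvPat1).toNat := by
          rw [PySem.Chars.slice_eq_listSlice, PySem.List.slice_to l h1]
        rw [ih (l.drop ((PySem.Chars.find l pvPat1).toNat + 4)) (by simp [List.length_drop]; omega)]
        have hne : (pvPat1 == pvPat2) = false := by decide
        simp only [PySem.Chars.slice_eq_listSlice] at hdrop htake
        rcases hm01 with hm | hm <;>
          simp [hdrop, htake, hm, hmsucc, hne, hmod]
      · -- event is pvPat2 at i2
        rw [if_neg hc, if_neg hc]
        have h2 : 0 ≤ PySem.Chars.find l pvPat2 := by
          have := PySem.Chars.neg_one_le_find l pvPat2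
          simp only [not_or, not_and, not_lt] at hc
          omega
        have hspec := PySem.Chars.find_spec (s := l) (sub := pvPat2) h2
        have hmin : ∀ i < (PySem.Chars.find l pvPat2).toNat,
            ¬ pvPat1 <+: l.drop i ∧ ¬ pvPat2 <+: l.drop i := by
          intro i hi
          refine ⟨?_, hspec.2 i hi⟩
          simp only [not_or, not_and, not_lt] at hc
          by_cases h1n : PySem.Chars.find l pvPat1 < 0
          · exact pvNoOcc l pvPat1 h1n i
          · exact (PySem.Chars.find_spec (s := l) (sub := pvPat1) (by omega)).2 i
              (by have := hc.2 (by omega); omega)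
        rw [pvMatchStep l out count (PySem.Chars.find l pvPat2).toNat pvPat2 (Or.inr rfl)
          hspec.1 hmin]
        have hlen4 : (PySem.Chars.find l pvPat2).toNat + 4 ≤ l.length := by
          have hx := hspec.1.length_le
          simp [List.length_drop, show pvPat2.length = 4 from rfl] at hx; omega
        have hdrop : PySem.Chars.slice l (some (PySem.Chars.find l pvPat2 + 4)) none
            = l.drop ((PySem.Chars.find l pvPat2).toNat + 4) := by
          rw [PySem.Chars.slice_eq_listSlice, PySem.List.slice_from l (by omega)]
          congr 1; omega
        have htake : PySem.Chars.slice l none (some (PySem.Chars.find l pvPat2))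
            = l.take (PySem.Chars.find l pvPat2).toNat := by
          rw [PySem.Chars.slice_eq_listSlice, PySem.List.slice_to l h2]
        rw [ih (l.drop ((PySem.Chars.find l pvPat2).toNat + 4)) (by simp [List.length_drop]; omega)]
        simp only [PySem.Chars.slice_eq_listSlice] at hdrop htake
        rcases hm01 with hm | hm <;>
          simp [hdrop, htake, hm, hmsucc, hmod]

-- ===== VERDICT (by name: the statement is the Claim_ definition above) =====
theorem get_line_info_spec : Claim_equal_get_line_info := by
  intro line _
  unfold Spec_get_line_info get_line_info get_line_info_alt
  have h := pvMain line.toList.length line.toList (le_refl _) [] 0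
  rw [show PySem.Int.mod 0 2 = 0 from rfl] at h
  exact h
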